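-- pv_equiv track=rewrite | github.com/LexSong/earth-reverse-engineering-utils | find_overlaps.py | parse_path_and_flags
-- ===== SOURCE A (Python) =====
-- def parse_path_and_flags(data):
--     def split_bits(x, n):
--         mask = (1 << n) - 1
--         return x >> n, x & mask
--
--     data, level = split_bits(data, 2)
--
--     path_segments = list()
--     for _ in range(level + 1):
--         data, x = split_bits(data, 3)
--         path_segments.append(x)
--
--     path = "".join(str(x) for x in path_segments)
--     return path, data
-- ===== SOURCE B (Python) =====
-- def parse_path_and_flags(data):
--     level = data & 3
--     path = "".join(str((data >> (2 + 3 * i)) & 7) for i in range(level + 1))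
--     return path, data >> (2 + 3 * (level + 1))
-- ===== Notes on version B (the rewrite author's own statement) =====
-- stated objective: simpler
-- what changed: B drops the split_bits helper and the threaded residual/accumulator state: it reads level with one mask, extracts each 3-bit segment by positional shift-and-mask directly from the original word, and computes the leftover with a single closed-form shift data >> (2+3*(level+1)).
import Mathlib
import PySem

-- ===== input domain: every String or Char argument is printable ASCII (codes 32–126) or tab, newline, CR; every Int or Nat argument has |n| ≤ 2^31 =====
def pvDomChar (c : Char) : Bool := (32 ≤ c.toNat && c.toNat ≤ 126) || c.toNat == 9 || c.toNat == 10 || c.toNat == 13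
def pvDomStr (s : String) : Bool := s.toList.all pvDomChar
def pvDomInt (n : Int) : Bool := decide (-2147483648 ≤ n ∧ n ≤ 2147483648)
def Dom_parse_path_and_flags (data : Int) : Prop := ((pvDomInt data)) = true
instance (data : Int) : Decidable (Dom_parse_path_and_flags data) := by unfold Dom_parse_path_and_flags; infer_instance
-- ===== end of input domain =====

-- B: reads level with one mask and each 3-bit segment by positional shift-and-mask from the
-- original word, with a closed-form leftover shift, instead of threading a residual through
-- a split_bits helper and an accumulated segment list; same cost, simpler decomposition.

-- ===== PORT A =====
def pvSplitBits (x : Int) (n : Nat) : Int × Int :=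
  let mask : Int := (1 <<< n) - 1
  (x >>> n, PySem.Int.band x mask)

def parse_path_and_flags (data : Int) : String × Int :=
  let p := pvSplitBits data 2
  let st := (PySem.List.pyRange 0 (p.2 + 1) 1).foldl
    (fun (acc : Int × List Int) _ =>
      let q := pvSplitBits acc.1 3
      (q.1, acc.2 ++ [q.2])) (p.1, [])
  (PySem.Str.join "" (st.2.map (fun x => PySem.Int.toStr x)), st.1)

-- ===== PORT B =====
def parse_path_and_flags_alt (data : Int) : String × Int :=
  let level := PySem.Int.band data 3
  let path := PySem.Str.join ""
    ((PySem.List.pyRange 0 (level + 1) 1).map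
      (fun i => PySem.Int.toStr (PySem.Int.band (data >>> (2 + 3 * i).toNat) 7)))
  (path, data >>> (2 + 3 * (level + 1)).toNat)

-- ===== PRECONDITION & SPEC =====
def Spec_parse_path_and_flags (data : Int) (out : String × Int) : Prop := out = parse_path_and_flags_alt data
instance (data : Int) (out : String × Int) : Decidable (Spec_parse_path_and_flags data out) := by unfold Spec_parse_path_and_flags; infer_instance

-- ===== CLAIM (what is proved, stated in full; the proofs are below) =====
def Claim_equal_parse_path_and_flags : Prop := ∀ (data : Int), Dom_parse_path_and_flags data → Spec_parse_path_and_flags data (parse_path_and_flags data)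

-- ===== LEMMAS AND PROOFS =====
-- Python's `x & 3` (PySem.Int.band) is `x % 4` (Lean emod), for every Int including negatives.
lemma pv_band3 (a : Int) : PySem.Int.band a 3 = a % 4 := by
  unfold PySem.Int.band
  have hand : ∀ n : Nat, n &&& 3 = n % 4 := by
    intro n
    have := Nat.and_two_pow_sub_one_eq_mod n 2
    norm_num at this; omega
  split_ifs with h1 h2 h3
  · rw [show ((3:Int).toNat = 3) from rfl, hand]
    have := Int.toNat_of_nonneg h1
    omega
  · omega
  · rw [show ((3:Int).toNat = 3) from rfl, Nat.and_comm, hand]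
    have := Int.toNat_of_nonneg (show (0:Int) ≤ -a - 1 by omega)
    omega
  · omega

-- split_bits on the two literal widths A uses, with the masks evaluated.
lemma pvSB2 (x : Int) : pvSplitBits x 2 = (x >>> (2:Nat), PySem.Int.band x 3) := by
  simp only [pvSplitBits]
  rw [show (((1 <<< 2 : Nat) : Int) - 1) = 3 by decide]

lemma pvSB3 (x : Int) : pvSplitBits x 3 = (x >>> (3:Nat), PySem.Int.band x 7) := by
  simp only [pvSplitBits]
  rw [show (((1 <<< 3 : Nat) : Int) - 1) = 7 by decide]

-- ===== VERDICT (by name: the statement is the Claim_ definition above) =====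
theorem parse_path_and_flags_spec : Claim_equal_parse_path_and_flags := by
  intro data _
  unfold Spec_parse_path_and_flags
  have h4 := pv_band3 data
  have h : PySem.Int.band data 3 = 0 ∨ PySem.Int.band data 3 = 1 ∨
      PySem.Int.band data 3 = 2 ∨ PySem.Int.band data 3 = 3 := by omega
  have e1 : PySem.List.pyRange 0 (0 + 1) 1 = [0] := by decide
  have e2 : PySem.List.pyRange 0 (1 + 1) 1 = [0, 1] := by decide
  have e3 : PySem.List.pyRange 0 (2 + 1) 1 = [0, 1, 2] := by decide
  have e4 : PySem.List.pyRange 0 (3 + 1) 1 = [0, 1, 2, 3] := by decide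
  have s5 : data >>> (2:Nat) >>> (3:Nat) = data >>> (5:Nat) :=
    (Int.shiftRight_add data 2 3).symm
  have s8 : data >>> (5:Nat) >>> (3:Nat) = data >>> (8:Nat) :=
    (Int.shiftRight_add data 5 3).symm
  have s11 : data >>> (8:Nat) >>> (3:Nat) = data >>> (11:Nat) :=
    (Int.shiftRight_add data 8 3).symm
  have s14 : data >>> (11:Nat) >>> (3:Nat) = data >>> (14:Nat) :=
    (Int.shiftRight_add data 11 3).symm
  rcases h with hL | hL | hL | hL <;>
    simp only [parse_path_and_flags, parse_path_and_flags_alt, pvSB2, pvSB3,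
      hL, e1, e2, e3, e4, List.foldl, List.map_cons, List.map_nil,
      List.singleton_append, List.cons_append, List.nil_append,
      s5, s8, s11, s14,
      show ((2:Int) + 3 * 0).toNat = 2 by decide,
      show ((2:Int) + 3 * 1).toNat = 5 by decide,
      show ((2:Int) + 3 * 2).toNat = 8 by decide,
      show ((2:Int) + 3 * 3).toNat = 11 by decide,
      show ((2:Int) + 3 * (0 + 1)).toNat = 5 by decide,
      show ((2:Int) + 3 * (1 + 1)).toNat = 8 by decide,
      show ((2:Int) + 3 * (2 + 1)).toNat = 11 by decide,
      show ((2:Int) + 3 * (3 + 1)).toNat = 14 by decide,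
      Int.shiftRight_natCast_right]
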